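-- pv_equiv track=rewrite | github.com/teamteamdev/ugractf-2023-quals | tasks/pebcak/encrypt.py | encrypt_flag
-- ===== SOURCE A (Python) =====
-- code = "ANEcwu4fYegObF1i2VXyvJHxKd0qBkMl36ILRaUjPG8rToSZzpCDt7n9mWsh5Q"
--
-- def encode(n):
-- 	if n == 0:
-- 		return ""
-- 	else:
-- 		return code[n % len(code)] + encode(n // len(code))
--
-- def encrypt_flag(flag):
-- 	numbers = []
-- 	s = ""
-- 	for i in range(len(flag)):
-- 		numbers.append(ord(flag[i]))
-- 		if i > 2:
-- 			numbers[i] = (numbers[i] + numbers[i-1] + numbers[i-2]) % 179179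
-- 		if i > 0:
-- 			s += "_"
-- 		s += encode(numbers[i])
-- 	return s
-- ===== SOURCE B (Python) =====
-- code = "ANEcwu4fYegObF1i2VXyvJHxKd0qBkMl36ILRaUjPG8rToSZzpCDt7n9mWsh5Q"
--
-- def encode(n):
--     out = []
--     while n:
--         out.append(code[n % len(code)])
--         n //= len(code)
--     return "".join(out)
--
-- def encrypt_flag(flag):
--     parts = []
--     p1 = p2 = 0
--     for i, ch in enumerate(flag):
--         n = ord(ch)
--         if i > 2:
--             n = (n + p1 + p2) % 179179
--         p2, p1 = p1, n
--         parts.append(encode(n))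
--     return "_".join(parts)
-- ===== Notes on version B (the rewrite author's own statement) =====
-- stated objective: simpler
-- what changed: encode becomes an iterative digit loop instead of string-building recursion, and encrypt_flag keeps two rolling variables and a final underscore-join of collected parts instead of growing a numbers list with back-indexing and incremental string concatenation.
import Mathlib
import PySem

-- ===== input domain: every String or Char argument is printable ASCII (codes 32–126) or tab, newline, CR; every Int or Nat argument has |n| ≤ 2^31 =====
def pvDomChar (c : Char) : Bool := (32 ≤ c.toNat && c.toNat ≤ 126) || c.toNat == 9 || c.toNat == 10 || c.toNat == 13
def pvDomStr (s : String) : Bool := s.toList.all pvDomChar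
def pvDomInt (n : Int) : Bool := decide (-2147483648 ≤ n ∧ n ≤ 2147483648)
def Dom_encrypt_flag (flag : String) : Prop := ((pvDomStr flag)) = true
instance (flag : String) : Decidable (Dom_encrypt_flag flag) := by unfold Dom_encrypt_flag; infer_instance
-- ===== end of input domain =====

-- B rewrites the recursive base-62 `encode` as an iterative digit loop and replaces A's
-- growing `numbers` list and incremental string by two rolling variables plus a final join
-- (objective: simpler; same asymptotic cost).

-- ===== PORT A =====
-- All integer values in this program are nonnegative (char codes and residues mod 179179),
-- so the ports carry them as Nat; Python's `//` and `%` agree with Nat `/` and `%` there.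
def pvCode : List Char := "ANEcwu4fYegObF1i2VXyvJHxKd0qBkMl36ILRaUjPG8rToSZzpCDt7n9mWsh5Q".toList

def pvEncodeA (n : Nat) : String :=
  if h : n = 0 then ""
  else String.singleton (pvCode.getD (n % pvCode.length) 'A') ++ pvEncodeA (n / pvCode.length)
decreasing_by exact Nat.div_lt_self (Nat.pos_of_ne_zero h) (by decide)

def pvStepA (cs : List Char) (st : List Nat × String) (i : Nat) : List Nat × String :=
  let numbers := st.1 ++ [(cs.getD i ' ').toNat]
  let numbers := if 2 < i then
      numbers.set i ((numbers.getD i 0 + numbers.getD (i-1) 0 + numbers.getD (i-2) 0) % 179179)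
    else numbers
  let s := if 0 < i then st.2 ++ "_" else st.2
  (numbers, s ++ pvEncodeA (numbers.getD i 0))

def encrypt_flag (flag : String) : String :=
  ((List.range flag.toList.length).foldl (pvStepA flag.toList) ([], "")).2

-- ===== PORT B =====
def pvEncodeLoop (n : Nat) (out : List Char) : List Char :=
  if h : n = 0 then out
  else pvEncodeLoop (n / pvCode.length) (out ++ [pvCode.getD (n % pvCode.length) 'A'])
decreasing_by exact Nat.div_lt_self (Nat.pos_of_ne_zero h) (by decide)

def pvEncodeB (n : Nat) : String := String.ofList (pvEncodeLoop n [])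

def pvLoopB : List Char → Nat → Nat → Nat → List String → List String
  | [], _, _, _, parts => parts
  | ch :: rest, i, p1, p2, parts =>
      let n := ch.toNat
      let n := if 2 < i then (n + p1 + p2) % 179179 else n
      pvLoopB rest (i+1) n p1 (parts ++ [pvEncodeB n])

def encrypt_flag_alt (flag : String) : String :=
  PySem.Str.join "_" (pvLoopB flag.toList 0 0 0 [])

-- ===== PRECONDITION & SPEC =====
def Spec_encrypt_flag (flag : String) (out : String) : Prop := out = encrypt_flag_alt flag
instance (flag : String) (out : String) : Decidable (Spec_encrypt_flag flag out) := by unfold Spec_encrypt_flag; infer_instance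

-- ===== CLAIM (what is proved, stated in full; the proofs are below) =====
def Claim_equal_encrypt_flag : Prop := ∀ (flag : String), Dom_encrypt_flag flag → Spec_encrypt_flag flag (encrypt_flag flag)

-- ===== LEMMAS AND PROOFS =====
theorem pvEncodeLoop_append (n : Nat) (out : List Char) :
    pvEncodeLoop n out = out ++ pvEncodeLoop n [] := by
  induction n using Nat.strong_induction_on generalizing out with
  | _ n ih =>
    by_cases h : n = 0
    · simp [pvEncodeLoop, h]
    · have hlt : n / pvCode.length < n := Nat.div_lt_self (Nat.pos_of_ne_zero h) (by decide)
      conv_lhs => rw [pvEncodeLoop]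
      conv_rhs => rw [pvEncodeLoop]
      simp only [h, dite_false, List.nil_append]
      rw [ih _ hlt (out ++ [pvCode.getD (n % pvCode.length) 'A']),
          ih _ hlt [pvCode.getD (n % pvCode.length) 'A']]
      simp

theorem pvEncode_eq (n : Nat) : pvEncodeA n = pvEncodeB n := by
  induction n using Nat.strong_induction_on with
  | _ n ih =>
    by_cases h : n = 0
    · subst h
      rw [pvEncodeA, pvEncodeB, pvEncodeLoop]
      simp
    · rw [pvEncodeA]
      simp only [h, dite_false]
      rw [ih _ (Nat.div_lt_self (Nat.pos_of_ne_zero h) (by decide))]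
      show String.singleton _ ++ pvEncodeB (n / pvCode.length) = pvEncodeB n
      conv_rhs => rw [pvEncodeB, pvEncodeLoop]
      simp only [h, dite_false, List.nil_append]
      rw [pvEncodeLoop_append]
      apply String.ext
      simp [String.singleton, pvEncodeB]

theorem pvJoin_snoc (sep : List Char) (l : List (List Char)) (x : List Char) :
    PySem.Chars.join sep (l ++ [x])
      = (if l = [] then [] else PySem.Chars.join sep l ++ sep) ++ x := by
  induction l with
  | nil => simp [PySem.Chars.join_singleton]
  | cons a as ih =>
    cases as with
    | nil => simp [PySem.Chars.join_singleton, PySem.Chars.join_cons_cons]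
    | cons b bs =>
      rw [List.cons_append, List.cons_append, PySem.Chars.join_cons_cons,
          ← List.cons_append, ih, PySem.Chars.join_cons_cons]
      simp

theorem pvGetD_snoc_len {α : Type} [Inhabited α] (l : List α) (x d : α) :
    (l ++ [x]).getD l.length d = x := by
  simp [List.getD_eq_getElem?_getD]

theorem pvGetD_snoc_lt {α : Type} [Inhabited α] (l : List α) (x d : α) (j : Nat) (h : j < l.length) :
    (l ++ [x]).getD j d = l.getD j d := by
  simp [List.getD_eq_getElem?_getD, List.getElem?_append_left h]

theorem pvMain (rest : List Char) (cs : List Char) (done : List Nat) (s : String)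
    (parts : List String) (p1 p2 : Nat)
    (hdrop : cs.drop done.length = rest)
    (hlen : parts.length = done.length)
    (hs : s.toList = PySem.Chars.join ['_'] (parts.map String.toList))
    (h1 : 1 ≤ done.length → p1 = done.getD (done.length - 1) 0)
    (h2 : 2 ≤ done.length → p2 = done.getD (done.length - 2) 0) :
    (((List.range' done.length rest.length).foldl (pvStepA cs) (done, s)).2).toList
      = PySem.Chars.join ['_'] ((pvLoopB rest done.length p1 p2 parts).map String.toList) := by
  induction rest generalizing done s parts p1 p2 with
  | nil => simpa [pvLoopB] using hs
  | cons c rest' ih =>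
    have hc : cs.getD done.length ' ' = c := by
      have h0 : cs[done.length]? = some c := by
        have := congrArg (fun l => l[0]?) hdrop
        simpa using this
      simp [List.getD_eq_getElem?_getD, h0]
    have hdrop' : cs.drop (done.length + 1) = rest' := by
      have h0 : List.drop 1 (List.drop done.length cs) = List.drop 1 (c :: rest') := by
        rw [hdrop]
      simpa [List.drop_drop, Nat.add_comm] using h0
    have hne : parts = [] ↔ done.length = 0 := by
      constructor
      · intro h; rw [← hlen, h]; rfl
      · intro h; rw [← List.length_eq_zero_iff, hlen, h]
    set nv : Nat := if 2 < done.length then (c.toNat + p1 + p2) % 179179 else c.toNat with hnv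
    have hstep : pvStepA cs (done, s) done.length
        = (done ++ [nv], (if 0 < done.length then s ++ "_" else s) ++ pvEncodeA nv) := by
      unfold pvStepA
      simp only [hc]
      by_cases hi : 2 < done.length
      · have e0 : (done ++ [c.toNat]).getD done.length 0 = c.toNat := pvGetD_snoc_len done _ 0
        have e1 : (done ++ [c.toNat]).getD (done.length - 1) 0 = p1 := by
          rw [pvGetD_snoc_lt done _ 0 _ (by omega), h1 (by omega)]
        have e2 : (done ++ [c.toNat]).getD (done.length - 2) 0 = p2 := by
          rw [pvGetD_snoc_lt done _ 0 _ (by omega), h2 (by omega)]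
        simp only [hi, if_true, e0, e1, e2, if_pos (by omega : 0 < done.length), hnv]
        have hset : (done ++ [c.toNat]).set done.length ((c.toNat + p1 + p2) % 179179)
            = done ++ [(c.toNat + p1 + p2) % 179179] := by simp
        rw [hset, pvGetD_snoc_len]
      · simp only [hi, if_false, pvGetD_snoc_len, hnv]
    have hloopB : pvLoopB (c :: rest') done.length p1 p2 parts
        = pvLoopB rest' (done.length + 1) nv p1 (parts ++ [pvEncodeB nv]) := rfl
    rw [List.length_cons, List.range'_succ, List.foldl_cons, hstep, hloopB]
    have hlen' : (done ++ [nv]).length = done.length + 1 := by simp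
    have hmain := ih (done := done ++ [nv])
      (s := (if 0 < done.length then s ++ "_" else s) ++ pvEncodeA nv)
      (parts := parts ++ [pvEncodeB nv]) (p1 := nv) (p2 := p1)
      (by rw [hlen']; exact hdrop')
      (by simp [hlen])
      (by
        rw [List.map_append, List.map_cons, List.map_nil, pvJoin_snoc]
        by_cases h0 : 0 < done.length
        · have hpne : List.map String.toList parts ≠ [] := by
            simp only [ne_eq, List.map_eq_nil_iff]
            intro hp; rw [hne] at hp; omega
          rw [if_pos h0, if_neg hpne]
          simp [hs, pvEncode_eq]
        · have hp : parts = [] := hne.mpr (by omega)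
          subst hp
          simp only [List.map_nil, PySem.Chars.join_nil] at hs
          rw [if_neg h0]
          simp [hs, pvEncode_eq])
      (by
        intro _
        rw [hlen', Nat.add_sub_cancel, pvGetD_snoc_len])
      (by
        intro hge
        rw [hlen'] at hge ⊢
        rw [show done.length + 1 - 2 = done.length - 1 from by omega]
        rw [pvGetD_snoc_lt done _ 0 _ (by omega)]
        exact h1 (by omega))
    rw [hlen'] at hmain
    exact hmain

-- ===== VERDICT (by name: the statement is the Claim_ definition above) =====
theorem encrypt_flag_spec : Claim_equal_encrypt_flag := by
  intro flag _
  unfold Spec_encrypt_flag encrypt_flag encrypt_flag_alt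
  apply String.ext
  rw [PySem.Str.toList_join, List.range_eq_range']
  exact pvMain flag.toList flag.toList [] "" [] 0 0 (by simp) rfl (by simp [PySem.Chars.join_nil])
    (by intro h; simp at h) (by intro h; simp at h)
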